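-- pv_equiv track=rewrite | github.com/adwaitmathkari/Python-Algorithms-Practice | servantsGreetings_stampmyvisa.py | servantGreetings
-- ===== SOURCE A (Python) =====
-- def servantGreetings(s):
--
--     rightS=0
--     leftS=0
--     greetings=0
--     for i in range(len(s)):
--         if s[i]=='>':
--             rightS+=1
--         elif s[i]=='<':
--             greetings+=rightS
--     for i in range(len(s)-1,-1,-1):
--         if s[i]=='<':
--             leftS+=1
--         elif s[i]=='>':
--             greetings+=leftS
--     return greetings
-- ===== SOURCE B (Python) =====
-- def servantGreetings(s):
--     seen = 0
--     acc = 0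
--     for c in s:
--         if c == '>':
--             seen += 1
--         elif c == '<':
--             acc += seen
--     return 2 * acc
-- ===== Notes on version B (the rewrite author's own statement) =====
-- stated objective: simpler
-- what changed: B replaces A's two symmetric index-based passes (forward counting '>' before '<', backward counting '<' after '>') with a single left-to-right pass over the characters whose pair count is doubled, since both passes count the same set of '>'..'<' pairs.
import Mathlib
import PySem

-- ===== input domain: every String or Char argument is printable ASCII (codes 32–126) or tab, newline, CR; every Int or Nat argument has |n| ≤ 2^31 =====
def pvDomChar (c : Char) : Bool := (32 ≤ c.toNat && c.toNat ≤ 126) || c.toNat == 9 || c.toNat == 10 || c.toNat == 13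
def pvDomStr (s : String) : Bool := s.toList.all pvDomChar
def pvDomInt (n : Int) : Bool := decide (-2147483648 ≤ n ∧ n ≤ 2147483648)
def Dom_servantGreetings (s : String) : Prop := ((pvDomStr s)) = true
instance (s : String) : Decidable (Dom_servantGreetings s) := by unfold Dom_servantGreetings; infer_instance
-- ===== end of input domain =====

-- B replaces A's two symmetric passes by one left-to-right pass whose pair count is doubled (simpler, same O(n) cost).


-- ===== PORT A =====
-- forward step: state (rightS, greetings)
def pvStepFwd (st : Int × Int) (c : Char) : Int × Int :=
  if c = '>' then (st.1 + 1, st.2)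
  else if c = '<' then (st.1, st.2 + st.1)
  else st

-- backward step: state (leftS, greetings)
def pvStepBwd (st : Int × Int) (c : Char) : Int × Int :=
  if c = '<' then (st.1 + 1, st.2)
  else if c = '>' then (st.1, st.2 + st.1)
  else st

def servantGreetings (s : String) : Int :=
  ((PySem.List.pyRange ((PySem.Str.len s) - 1) (-1) (-1)).foldl
      (fun st i => pvStepBwd st (PySem.List.pyGetD s.toList i ' '))
      (0,
       ((PySem.List.pyRange 0 (PySem.Str.len s) 1).foldl
          (fun st i => pvStepFwd st (PySem.List.pyGetD s.toList i ' ')) (0, 0)).2)).2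

-- ===== PORT B =====
def servantGreetings_alt (s : String) : Int :=
  let st : Int × Int :=
    s.toList.foldl (fun st c =>
      if c = '>' then (st.1 + 1, st.2)
      else if c = '<' then (st.1, st.2 + st.1)
      else st) (0, 0)
  2 * st.2

-- ===== PRECONDITION & SPEC =====
def Spec_servantGreetings (s : String) (out : Int) : Prop := out = servantGreetings_alt s
instance (s : String) (out : Int) : Decidable (Spec_servantGreetings s out) := by unfold Spec_servantGreetings; infer_instance

-- ===== CLAIM (what is proved, stated in full; the proofs are below) =====
def Claim_equal_servantGreetings : Prop := ∀ (s : String), Dom_servantGreetings s → Spec_servantGreetings s (servantGreetings s)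

-- ===== LEMMAS AND PROOFS =====

def cntGT (l : List Char) : Int := (l.countP (· = '>') : Int)
def cntLT (l : List Char) : Int := (l.countP (· = '<') : Int)

-- number of pairs i < j with l[i] = '>' and l[j] = '<'
def pairsGL : List Char → Int
  | [] => 0
  | c :: t => (if c = '>' then cntLT t else 0) + pairsGL t

-- number of pairs i < j with l[i] = '<' and l[j] = '>'
def pairsLG : List Char → Int
  | [] => 0
  | c :: t => (if c = '<' then cntGT t else 0) + pairsLG t

theorem cntGT_nil : cntGT [] = 0 := rfl
theorem cntLT_nil : cntLT [] = 0 := rfl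

theorem cntGT_cons (c : Char) (t : List Char) :
    cntGT (c :: t) = (if c = '>' then 1 else 0) + cntGT t := by
  simp [cntGT, List.countP_cons]; split_ifs <;> ring

theorem cntLT_cons (c : Char) (t : List Char) :
    cntLT (c :: t) = (if c = '<' then 1 else 0) + cntLT t := by
  simp [cntLT, List.countP_cons]; split_ifs <;> ring

theorem cntGT_append (m t : List Char) : cntGT (m ++ t) = cntGT m + cntGT t := by
  simp [cntGT, List.countP_append]

theorem cntGT_reverse (l : List Char) : cntGT l.reverse = cntGT l := by
  simp [cntGT, List.countP_reverse]

theorem cntLT_reverse (l : List Char) : cntLT l.reverse = cntLT l := by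
  simp [cntLT, List.countP_reverse]

theorem foldl_fwd (l : List Char) (r g : Int) :
    l.foldl pvStepFwd (r, g) = (r + cntGT l, g + r * cntLT l + pairsGL l) := by
  induction l generalizing r g with
  | nil => simp [cntGT_nil, cntLT_nil, pairsGL]
  | cons c t ih =>
    simp only [List.foldl_cons, pvStepFwd, cntGT_cons, cntLT_cons, pairsGL]
    split_ifs with h1 h2
    · exact absurd (h1.symm.trans h2) (by decide)
    · simp only [ih, Prod.mk.injEq]; exact ⟨by ring, by ring⟩
    · simp only [ih, Prod.mk.injEq]; exact ⟨by ring, by ring⟩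
    · simp only [ih, Prod.mk.injEq]; exact ⟨by ring, by ring⟩

theorem foldl_bwd (l : List Char) (r g : Int) :
    l.foldl pvStepBwd (r, g) = (r + cntLT l, g + r * cntGT l + pairsLG l) := by
  induction l generalizing r g with
  | nil => simp [cntGT_nil, cntLT_nil, pairsLG]
  | cons c t ih =>
    simp only [List.foldl_cons, pvStepBwd, cntGT_cons, cntLT_cons, pairsLG]
    split_ifs with h1 h2
    · exact absurd (h1.symm.trans h2) (by decide)
    · simp only [ih, Prod.mk.injEq]; exact ⟨by ring, by ring⟩
    · simp only [ih, Prod.mk.injEq]; exact ⟨by ring, by ring⟩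
    · simp only [ih, Prod.mk.injEq]; exact ⟨by ring, by ring⟩

theorem pairsLG_append_singleton (m : List Char) (c : Char) :
    pairsLG (m ++ [c]) = pairsLG m + (if c = '>' then cntLT m else 0) := by
  induction m with
  | nil => simp only [List.nil_append, pairsLG, cntGT_nil, cntLT_nil]; split_ifs <;> ring
  | cons d t ih =>
    simp only [List.cons_append, pairsLG, ih, cntLT_cons, cntGT_append, cntGT_cons, cntGT_nil]
    split_ifs <;> ring

theorem pairsLG_reverse (l : List Char) : pairsLG l.reverse = pairsGL l := by
  induction l with
  | nil => rfl
  | cons c t ih =>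
    simp only [List.reverse_cons, pairsLG_append_singleton, ih, cntLT_reverse, pairsGL]
    ring

theorem servantGreetings_eq (s : String) : servantGreetings s = 2 * pairsGL s.toList := by
  unfold servantGreetings
  rw [show PySem.Str.len s = (s.toList.length : Int) by simp]
  rw [PySem.List.foldl_pyRange_zero_pyGetD' s.toList ' ' pvStepFwd (0, 0)]
  rw [PySem.List.pyRange_neg_one_eq_reverse]
  rw [show ((-1 : Int) + 1) = 0 by ring,
      show ((s.toList.length : Int) - 1 + 1) = (s.toList.length : Int) by ring]
  have hrev : ∀ (init : Int × Int),
      (PySem.List.pyRange 0 (s.toList.length : Int) 1).reverse.foldl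
        (fun st i => pvStepBwd st (PySem.List.pyGetD s.toList i ' ')) init
      = s.toList.reverse.foldl pvStepBwd init := by
    intro init
    rw [show (PySem.List.pyRange 0 (s.toList.length : Int) 1).reverse.foldl
          (fun st i => pvStepBwd st (PySem.List.pyGetD s.toList i ' ')) init
        = (((PySem.List.pyRange 0 (s.toList.length : Int) 1).map
            (fun i => PySem.List.pyGetD s.toList i ' ')).reverse).foldl pvStepBwd init by
      rw [← List.foldl_map, List.map_reverse]]
    rw [PySem.List.map_pyGetD_pyRange_zero' s.toList ' ']
  rw [hrev]
  rw [foldl_fwd, foldl_bwd, pairsLG_reverse, cntGT_reverse]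
  ring

theorem servantGreetings_alt_eq (s : String) : servantGreetings_alt s = 2 * pairsGL s.toList := by
  unfold servantGreetings_alt
  have h : (fun (st : Int × Int) (c : Char) =>
      if c = '>' then (st.1 + 1, st.2)
      else if c = '<' then (st.1, st.2 + st.1)
      else st) = pvStepFwd := by
    funext st c; simp [pvStepFwd]
  rw [h, foldl_fwd]
  ring

-- ===== VERDICT (by name: the statement is the Claim_ definition above) =====
theorem servantGreetings_spec : Claim_equal_servantGreetings := by
  intro s _
  unfold Spec_servantGreetings
  rw [servantGreetings_eq, servantGreetings_alt_eq]
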